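-- pv_equiv track=rewrite | github.com/ChimCatz/Data_Pivot_Table_tool | gui/column_mapper.py | auto_detect
-- ===== SOURCE A (Python) =====
-- def auto_detect(field, columns):
--
--     rules = {
--         "Country": [
--             "country",
--             "country name",
--             "country region",
--             "geo country"
--         ],
--         "Job Level": [
--             "job level",
--             "seniority",
--             "title",
--             "position"
--         ],
--         "Industry": [
--             "industry",
--             "sector",
--             "market",
--             "vertical"
--         ]
--     }
--
--     for col in columns:
--         col_clean = col.lower().strip()
--
--         for keyword in rules[field]:
--             if col_clean == keyword:
--                 return col
--
--     for col in columns: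
--         col_clean = col.lower().strip()
--
--         for keyword in rules[field]:
--             if col_clean.startswith(keyword):
--                 return col
--
--     for col in columns:
--         words = col.lower().replace("/", " ").split()
--
--         for keyword in rules[field]:
--             if keyword in words:
--                 return col
--
--     return None
-- ===== SOURCE B (Python) =====
-- def auto_detect(field, columns):
--
--     rules = {
--         "Country": [
--             "country",
--             "country name",
--             "country region",
--             "geo country"
--         ],
--         "Job Level": [
--             "job level",
--             "seniority",
--             "title",
--             "position"
--         ],
--         "Industry": [
--             "industry",
--             "sector",
--             "market",
--             "vertical"
--         ]
--     }
--
--     best_rank = 4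
--     best_col = None
--     for col in columns:
--         keywords = rules[field]
--         low = col.lower()
--         clean = low.strip()
--         if any(clean == kw for kw in keywords):
--             rank = 1
--         elif any(clean.startswith(kw) for kw in keywords):
--             rank = 2
--         elif any(kw in low.replace("/", " ").split() for kw in keywords):
--             rank = 3
--         else:
--             rank = 4
--         if rank < best_rank:
--             best_rank = rank
--             best_col = col
--     return best_col if best_rank < 4 else None
-- ===== Notes on version B (the rewrite author's own statement) =====
-- stated objective: alternative
-- what changed: Replaces A's three full passes over columns (exact match, then prefix match, then word match) by a single pass that assigns each column a rank 1-3 (4 = no match) and keeps the earliest column of minimal rank.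
import Mathlib
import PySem

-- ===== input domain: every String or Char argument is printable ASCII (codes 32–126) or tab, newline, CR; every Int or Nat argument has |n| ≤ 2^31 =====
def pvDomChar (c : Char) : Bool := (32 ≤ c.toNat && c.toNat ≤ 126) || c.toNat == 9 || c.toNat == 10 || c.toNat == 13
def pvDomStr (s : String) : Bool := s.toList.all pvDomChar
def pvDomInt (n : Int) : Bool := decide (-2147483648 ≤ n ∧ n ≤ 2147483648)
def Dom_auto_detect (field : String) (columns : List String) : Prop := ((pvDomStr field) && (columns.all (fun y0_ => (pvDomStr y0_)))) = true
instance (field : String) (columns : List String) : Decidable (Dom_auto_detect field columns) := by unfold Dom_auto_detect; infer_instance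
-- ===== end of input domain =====

-- B replaces A's three sequential scans of columns by one rank-minimising pass (objective: alternative decomposition, same cost class).


-- the rules dict literal shared by both Python sources
def pvRules : PySem.Dict String (List String) :=
  PySem.Dict.mk
    [("Country", ["country", "country name", "country region", "geo country"]),
     ("Job Level", ["job level", "seniority", "title", "position"]),
     ("Industry", ["industry", "sector", "market", "vertical"])]

-- ===== PORT A =====
-- first loop: exact match of col.lower().strip() against a keyword
def adPass1 (kws : List String) : List String → Option String
  | [] => none
  | col :: rest =>
      if kws.any (fun k => PySem.Str.strip (PySem.Str.lower col) == k) then some col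
      else adPass1 kws rest

-- second loop: col.lower().strip() startswith a keyword
def adPass2 (kws : List String) : List String → Option String
  | [] => none
  | col :: rest =>
      if kws.any (fun k => PySem.Str.startswith (PySem.Str.strip (PySem.Str.lower col)) k) then some col
      else adPass2 kws rest

-- third loop: keyword in col.lower().replace("/", " ").split()
def adPass3 (kws : List String) : List String → Option String
  | [] => none
  | col :: rest =>
      if kws.any (fun k => (PySem.Str.split₀ (PySem.Str.replace (PySem.Str.lower col) "/" " ")).contains k) then some col
      else adPass3 kws rest

def auto_detect (field : String) (columns : List String) : Option String :=
  match pvRules.get? field with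
  | none => none   -- Python raises KeyError here when columns ≠ []; excluded by Pre_
  | some kws =>
      match adPass1 kws columns with
      | some c => some c
      | none =>
          match adPass2 kws columns with
          | some c => some c
          | none => adPass3 kws columns

-- ===== PORT B =====
-- rank of one column: 1 exact, 2 prefix, 3 word match, 4 none
def adRank (kws : List String) (col : String) : Nat :=
  let low := PySem.Str.lower col
  let clean := PySem.Str.strip low
  if kws.any (fun kw => clean == kw) then 1
  else if kws.any (fun kw => PySem.Str.startswith clean kw) then 2
  else if kws.any (fun kw => (PySem.Str.split₀ (PySem.Str.replace low "/" " ")).contains kw) then 3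
  else 4

-- single pass keeping the earliest column of minimal rank
def adLoop (kws : List String) : List String → Nat → Option String → Nat × Option String
  | [], bestRank, bestCol => (bestRank, bestCol)
  | col :: rest, bestRank, bestCol =>
      let r := adRank kws col
      if r < bestRank then adLoop kws rest r (some col)
      else adLoop kws rest bestRank bestCol

def auto_detect_alt (field : String) (columns : List String) : Option String :=
  match pvRules.get? field with
  | none => none   -- Python B raises KeyError here when columns ≠ [] (excluded by Pre_); never looks up on []
  | some kws =>
      let res := adLoop kws columns 4 none
      if res.1 < 4 then res.2 else none

-- ===== PRECONDITION & SPEC =====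
-- Pre_ excludes exactly the inputs where A raises KeyError: a field outside the rules dict
-- together with a nonempty columns list (with empty columns the lookup is never reached and A returns None).
def Pre_auto_detect (field : String) (columns : List String) : Prop :=
  field = "Country" ∨ field = "Job Level" ∨ field = "Industry" ∨ columns = []
instance (field : String) (columns : List String) : Decidable (Pre_auto_detect field columns) := by
  unfold Pre_auto_detect; infer_instance

def pvWitness_auto_detect : String × List String := ("Country", ["Year", "Geo Country ", "Title"])

def Spec_auto_detect (field : String) (columns : List String) (out : Option String) : Prop := out = auto_detect_alt field columns
instance (field : String) (columns : List String) (out : Option String) : Decidable (Spec_auto_detect field columns out) := by unfold Spec_auto_detect; infer_instance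

-- ===== CLAIM (what is proved, stated in full; the proofs are below) =====
def Claim_equal_auto_detect : Prop := ∀ (field : String) (columns : List String), Dom_auto_detect field columns → Pre_auto_detect field columns → Spec_auto_detect field columns (auto_detect field columns)

-- ===== LEMMAS AND PROOFS =====

-- the three per-column predicates of A
def adQ1 (kws : List String) (col : String) : Bool :=
  kws.any (fun k => PySem.Str.strip (PySem.Str.lower col) == k)
def adQ2 (kws : List String) (col : String) : Bool :=
  kws.any (fun k => PySem.Str.startswith (PySem.Str.strip (PySem.Str.lower col)) k)
def adQ3 (kws : List String) (col : String) : Bool :=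
  kws.any (fun k => (PySem.Str.split₀ (PySem.Str.replace (PySem.Str.lower col) "/" " ")).contains k)

theorem adPass1_eq_find (kws : List String) (cols : List String) :
    adPass1 kws cols = cols.find? (adQ1 kws) := by
  induction cols with
  | nil => rfl
  | cons c cs ih =>
      rw [show adPass1 kws (c :: cs) =
            (if adQ1 kws c = true then some c else adPass1 kws cs) from rfl,
          List.find?_cons]
      by_cases h : adQ1 kws c
      · simp [h]
      · simp [h, ih]

theorem adPass2_eq_find (kws : List String) (cols : List String) :
    adPass2 kws cols = cols.find? (adQ2 kws) := by
  induction cols with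
  | nil => rfl
  | cons c cs ih =>
      rw [show adPass2 kws (c :: cs) =
            (if adQ2 kws c = true then some c else adPass2 kws cs) from rfl,
          List.find?_cons]
      by_cases h : adQ2 kws c
      · simp [h]
      · simp [h, ih]

theorem adPass3_eq_find (kws : List String) (cols : List String) :
    adPass3 kws cols = cols.find? (adQ3 kws) := by
  induction cols with
  | nil => rfl
  | cons c cs ih =>
      rw [show adPass3 kws (c :: cs) =
            (if adQ3 kws c = true then some c else adPass3 kws cs) from rfl,
          List.find?_cons]
      by_cases h : adQ3 kws c
      · simp [h]
      · simp [h, ih]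

theorem adRank_eq_q (kws : List String) (c : String) :
    adRank kws c = if adQ1 kws c then 1 else if adQ2 kws c then 2 else if adQ3 kws c then 3 else 4 := rfl

theorem adRank_eq_one_iff (kws : List String) (c : String) :
    adRank kws c = 1 ↔ adQ1 kws c = true := by
  rw [adRank_eq_q]
  split_ifs <;> simp_all

theorem adRank_eq_two_iff (kws : List String) (c : String) :
    adRank kws c = 2 ↔ (adQ1 kws c = false ∧ adQ2 kws c = true) := by
  rw [adRank_eq_q]
  split_ifs <;> simp_all

theorem adRank_eq_three_iff (kws : List String) (c : String) :
    adRank kws c = 3 ↔ (adQ1 kws c = false ∧ adQ2 kws c = false ∧ adQ3 kws c = true) := by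
  rw [adRank_eq_q]
  split_ifs <;> simp_all

theorem adRank_eq_four_iff (kws : List String) (c : String) :
    adRank kws c = 4 ↔ (adQ1 kws c = false ∧ adQ2 kws c = false ∧ adQ3 kws c = false) := by
  rw [adRank_eq_q]
  split_ifs <;> simp_all

theorem adRank_pos (kws : List String) (c : String) : 1 ≤ adRank kws c := by
  simp only [adRank]; split_ifs <;> omega

theorem adRank_le_four (kws : List String) (c : String) : adRank kws c ≤ 4 := by
  simp only [adRank]; split_ifs <;> omega

-- minimal rank over a list (5 for the empty list)
def adMinRank (kws : List String) (cols : List String) : Nat :=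
  cols.foldr (fun c m => min (adRank kws c) m) 5

theorem adMinRank_le {kws : List String} {cols : List String} {c : String} (h : c ∈ cols) :
    adMinRank kws cols ≤ adRank kws c := by
  induction cols with
  | nil => cases h
  | cons x xs ih =>
      rcases List.mem_cons.mp h with h | h
      · subst h; simp [adMinRank]
      · simp only [adMinRank, List.foldr_cons] at *
        exact le_trans (min_le_right _ _) (ih h)

theorem adMinRank_mem {kws : List String} {cols : List String} (h : adMinRank kws cols ≤ 4) :
    ∃ c ∈ cols, adRank kws c = adMinRank kws cols := by
  induction cols with
  | nil => simp [adMinRank] at h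
  | cons x xs ih =>
      simp only [adMinRank, List.foldr_cons] at *
      rcases le_total (adRank kws x) (xs.foldr (fun c m => min (adRank kws c) m) 5) with hle | hle
      · exact ⟨x, List.mem_cons_self, by omega⟩
      · obtain ⟨c, hc, hr⟩ := ih (by omega)
        exact ⟨c, List.mem_cons_of_mem _ hc, by omega⟩

theorem adMinRank_le_five (kws : List String) (cols : List String) : adMinRank kws cols ≤ 5 := by
  induction cols with
  | nil => simp [adMinRank]
  | cons x xs ih => simp only [adMinRank, List.foldr_cons] at *; omega

-- the key invariant of B's single pass
theorem adLoop_spec (kws : List String) (cols : List String) :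
    ∀ br bc, br ≤ 4 →
      adLoop kws cols br bc =
        if adMinRank kws cols < br then
          (adMinRank kws cols, cols.find? (fun c => adRank kws c == adMinRank kws cols))
        else (br, bc) := by
  induction cols with
  | nil =>
      intro br bc hbr
      have : ¬ adMinRank kws [] < br := by simp [adMinRank]; omega
      simp [adLoop, this]
  | cons x xs ih =>
      intro br bc hbr
      have hm : adMinRank kws (x :: xs) = min (adRank kws x) (adMinRank kws xs) := rfl
      have hx4 := adRank_le_four kws x
      simp only [adLoop]
      by_cases hlt : adRank kws x < br
      · simp only [if_pos hlt]
        rw [ih _ _ (by omega)]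
        by_cases h2 : adMinRank kws xs < adRank kws x
        · have hmin : adMinRank kws (x :: xs) = adMinRank kws xs := by rw [hm]; omega
          have hne : ¬ (adRank kws x == adMinRank kws xs) = true := by simp; omega
          simp [h2, hmin, hne]
          omega
        · have hmin : adMinRank kws (x :: xs) = adRank kws x := by rw [hm]; omega
          have heq : (adRank kws x == adMinRank kws (x :: xs)) = true := by simp [hmin]
          simp [h2, hmin, List.find?_cons, heq, hlt]
      · simp only [if_neg hlt]
        rw [ih _ _ hbr]
        by_cases h2 : adMinRank kws xs < br
        · have hmin : adMinRank kws (x :: xs) = adMinRank kws xs := by rw [hm]; omega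
          have hne : ¬ (adRank kws x == adMinRank kws xs) = true := by simp; omega
          simp [h2, hmin, hne]
        · have : ¬ adMinRank kws (x :: xs) < br := by rw [hm]; omega
          simp [h2, this]

theorem find?_congr_mem {α : Type} {p q : α → Bool} :
    ∀ (l : List α), (∀ c ∈ l, p c = q c) → l.find? p = l.find? q
  | [], _ => rfl
  | x :: xs, h => by
      have hx := h x List.mem_cons_self
      simp only [List.find?_cons, hx]
      split
      · rfl
      · exact find?_congr_mem xs (fun c hc => h c (List.mem_cons_of_mem _ hc))

-- the heart of the equivalence: A's three scans = B's single rank-minimising pass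
theorem passes_eq_alt (kws : List String) (cols : List String) :
    (match adPass1 kws cols with
     | some c => some c
     | none =>
        match adPass2 kws cols with
        | some c => some c
        | none => adPass3 kws cols) =
    (let res := adLoop kws cols 4 none
     if res.1 < 4 then res.2 else none) := by
  rw [adPass1_eq_find, adPass2_eq_find, adPass3_eq_find,
      adLoop_spec kws cols 4 none (by omega)]
  have hub := adMinRank_le_five kws cols
  set m := adMinRank kws cols with hmdef
  have hle : ∀ c ∈ cols, m ≤ adRank kws c := fun c hc => adMinRank_le hc
  interval_cases m
  · -- m = 0: impossible since every rank ≥ 1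
    exfalso
    obtain ⟨c, hc, hr⟩ := adMinRank_mem (kws := kws) (cols := cols) (by omega)
    have := adRank_pos kws c; omega
  · -- m = 1: first exact match wins in both
    obtain ⟨c0, hc0, hr0⟩ := adMinRank_mem (kws := kws) (cols := cols) (by omega)
    have h1 : cols.find? (fun c => adRank kws c == 1) = cols.find? (adQ1 kws) := by
      apply find?_congr_mem; intro c _
      by_cases h : adQ1 kws c = true
      · simp [h, (adRank_eq_one_iff kws c).mpr h]
      · have : adRank kws c ≠ 1 := fun he => h ((adRank_eq_one_iff kws c).mp he)
        simp_all
    have hsome : (cols.find? (adQ1 kws)).isSome := by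
      rw [List.find?_isSome]
      exact ⟨c0, hc0, (adRank_eq_one_iff kws c0).mp (by rw [← hmdef] at hr0; omega)⟩
    obtain ⟨c, hc⟩ := Option.isSome_iff_exists.mp hsome
    simp [h1, hc]
  · -- m = 2: pass1 empty, first prefix match wins in both
    obtain ⟨c0, hc0, hr0⟩ := adMinRank_mem (kws := kws) (cols := cols) (by omega)
    have hno1 : cols.find? (adQ1 kws) = none := by
      rw [List.find?_eq_none]
      intro c hc h1
      have := (adRank_eq_one_iff kws c).mpr h1
      have := hle c hc; omega
    have h2 : cols.find? (fun c => adRank kws c == 2) = cols.find? (adQ2 kws) := by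
      apply find?_congr_mem; intro c hc
      have hge := hle c hc
      by_cases h : adQ2 kws c = true
      · have hq1 : adQ1 kws c = false := by
          rcases Bool.eq_false_or_eq_true (adQ1 kws c) with ht | hf
          · have := (adRank_eq_one_iff kws c).mpr ht; omega
          · exact hf
        simp [h, (adRank_eq_two_iff kws c).mpr ⟨hq1, h⟩]
      · have : adRank kws c ≠ 2 := fun he => h ((adRank_eq_two_iff kws c).mp he).2
        simp_all
    have hq2 : adQ2 kws c0 = true := by
      have := (adRank_eq_two_iff kws c0).mp (by rw [← hmdef] at hr0; omega)
      exact this.2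
    have hsome : (cols.find? (adQ2 kws)).isSome := by
      rw [List.find?_isSome]; exact ⟨c0, hc0, hq2⟩
    obtain ⟨c, hc⟩ := Option.isSome_iff_exists.mp hsome
    simp [hno1, h2, hc]
  · -- m = 3: passes 1,2 empty, first word match wins in both
    obtain ⟨c0, hc0, hr0⟩ := adMinRank_mem (kws := kws) (cols := cols) (by omega)
    have hnoQ1 : ∀ c ∈ cols, adQ1 kws c = false := by
      intro c hc
      rcases Bool.eq_false_or_eq_true (adQ1 kws c) with ht | hf
      · have := (adRank_eq_one_iff kws c).mpr ht
        have := hle c hc; omega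
      · exact hf
    have hnoQ2 : ∀ c ∈ cols, adQ2 kws c = false := by
      intro c hc
      rcases Bool.eq_false_or_eq_true (adQ2 kws c) with ht | hf
      · have hr := (adRank_eq_two_iff kws c).mpr ⟨hnoQ1 c hc, ht⟩
        have := hle c hc; omega
      · exact hf
    have hno1 : cols.find? (adQ1 kws) = none := by
      rw [List.find?_eq_none]; intro c hc; simp [hnoQ1 c hc]
    have hno2 : cols.find? (adQ2 kws) = none := by
      rw [List.find?_eq_none]; intro c hc; simp [hnoQ2 c hc]
    have h3 : cols.find? (fun c => adRank kws c == 3) = cols.find? (adQ3 kws) := by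
      apply find?_congr_mem; intro c hc
      by_cases h : adQ3 kws c = true
      · simp [h, (adRank_eq_three_iff kws c).mpr ⟨hnoQ1 c hc, hnoQ2 c hc, h⟩]
      · have : adRank kws c ≠ 3 := fun he => h ((adRank_eq_three_iff kws c).mp he).2.2
        simp_all
    have hq3 : adQ3 kws c0 = true := by
      have := (adRank_eq_three_iff kws c0).mp (by rw [← hmdef] at hr0; omega)
      exact this.2.2
    have hsome : (cols.find? (adQ3 kws)).isSome := by
      rw [List.find?_isSome]; exact ⟨c0, hc0, hq3⟩
    obtain ⟨c, hc⟩ := Option.isSome_iff_exists.mp hsome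
    simp [hno1, hno2, h3, hc]
  · -- m = 4: nothing matches anywhere, both return none
    have hall : ∀ c ∈ cols, adQ1 kws c = false ∧ adQ2 kws c = false ∧ adQ3 kws c = false := by
      intro c hc
      have h4 : adRank kws c = 4 := by
        have := hle c hc; have := adRank_le_four kws c; omega
      exact (adRank_eq_four_iff kws c).mp h4
    have hno1 : cols.find? (adQ1 kws) = none := by
      rw [List.find?_eq_none]; intro c hc; simp [(hall c hc).1]
    have hno2 : cols.find? (adQ2 kws) = none := by
      rw [List.find?_eq_none]; intro c hc; simp [(hall c hc).2.1]
    have hno3 : cols.find? (adQ3 kws) = none := by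
      rw [List.find?_eq_none]; intro c hc; simp [(hall c hc).2.2]
    simp [hno1, hno2, hno3]
  · -- m = 5: cols is empty (any member would force m ≤ 4)
    have hnil : cols = [] := by
      cases cols with
      | nil => rfl
      | cons x xs =>
          exfalso
          have := hle x List.mem_cons_self
          have := adRank_le_four kws x; omega
    subst hnil; simp

-- ===== VERDICT (by name: the statement is the Claim_ definition above) =====
theorem auto_detect_spec : Claim_equal_auto_detect := by
  intro field columns _ _
  unfold Spec_auto_detect auto_detect auto_detect_alt
  cases pvRules.get? field with
  | none => rfl
  | some kws => exact passes_eq_alt kws columns
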